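-- pv_equiv track=rewrite | github.com/lishuhuakai/CS | CS262_Building_A_Web_Browser/chap03/hw/Reading_Machine_Minds_2.py | cfgempty
-- ===== SOURCE A (Python) =====
-- def cfgempty(grammar, symbol, visited):
--     """
--     非常漂亮的代码！
--     """
--     if symbol in visited: # 首先要求这个symbol不能是已经被访问过的，为啥？
--     # no infinite loops
--         return None
--     elif not any([rule[0] == symbol for rule in grammar]): # 前面的两种情况，是递归的终止条件吧！
--         return [symbol]  # 这里表示symbol是终结符
--     else: # 这里表示symbol之前没有被使用过，并且symbol是非终结符
--         new_visited = visited + [symbol]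
--         # 这里表示，我们要使用这个symbol进行推导了，从这个symbol出发，推导出子表达式
--         # 后面的代码里递归，也就是说，如果字表达式里有一个symbol又可以推导出这个父symbol的话，这就构成了loop
--         # 这样玩下去是没有出路的
--         # conside every rewrite rule "Symbol => RHS"
--         for rhs in [r[1] for r in grammar if r[0] == symbol]: # 如果symbol可以被替换掉
--             # check if every part of RHS is non-empty
--             if all([None != cfgempty(grammar, r, new_visited) for r in rhs]): # 也就是rhs的每一个元素都是终结符
--                 result = [] # gather up result
--                 for r in rhs:
--                     result = result + cfgempty(grammar, r, new_visited)
--                 return result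
--     return None
-- ===== SOURCE B (Python) =====
-- def _derive(grammar, rhs, visited):
--     parts = []
--     for r in rhs:
--         sub = cfgempty(grammar, r, visited)
--         if sub is None:
--             return None
--         parts = parts + sub
--     return parts
--
--
-- def cfgempty(grammar, symbol, visited):
--     if symbol in visited:
--         return None
--     rhss = [r[1] for r in grammar if r[0] == symbol]
--     if not rhss:
--         return [symbol]
--     new_visited = visited + [symbol]
--     for rhs in rhss:
--         parts = _derive(grammar, rhs, new_visited)
--         if parts is not None:
--             return parts
--     return None
-- ===== Notes on version B (the rewrite author's own statement) =====
-- stated objective: alternative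
-- what changed: B scans the grammar once per node (one filter giving the matching RHSs, whose emptiness doubles as the terminal test, instead of A's separate any-scan plus filter-scan) and expands each RHS in a single left-to-right pass that computes each sub-symbol's derivation exactly once and aborts on the first failure, where A recomputes every sub-derivation twice (once in the all() feasibility check, again when concatenating the result).
import Mathlib
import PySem

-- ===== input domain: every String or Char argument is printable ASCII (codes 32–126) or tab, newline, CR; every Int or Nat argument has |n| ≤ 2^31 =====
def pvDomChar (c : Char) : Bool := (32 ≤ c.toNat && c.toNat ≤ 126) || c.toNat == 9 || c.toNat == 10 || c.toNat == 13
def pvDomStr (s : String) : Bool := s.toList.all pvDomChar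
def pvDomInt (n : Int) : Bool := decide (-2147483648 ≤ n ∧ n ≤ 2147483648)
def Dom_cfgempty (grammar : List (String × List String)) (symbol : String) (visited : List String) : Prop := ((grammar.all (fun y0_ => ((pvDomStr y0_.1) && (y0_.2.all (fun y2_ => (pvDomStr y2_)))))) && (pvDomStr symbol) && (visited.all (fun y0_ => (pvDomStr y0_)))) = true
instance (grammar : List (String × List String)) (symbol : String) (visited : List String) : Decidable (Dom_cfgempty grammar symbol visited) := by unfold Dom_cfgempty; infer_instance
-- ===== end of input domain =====

-- B computes each sub-symbol's derivation once per RHS (A recomputes it twice: once in the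
-- all-check, once when building the result) and scans the grammar once; same return value.

-- measure used only for termination: number of distinct grammar LHS symbols not yet visited
def pvMeasure (grammar : List (String × List String)) (visited : List String) : Nat :=
  ((grammar.map Prod.fst).toFinset \ visited.toFinset).card

theorem pvMeasure_lt (grammar : List (String × List String)) (symbol : String)
    (visited : List String) (h1 : symbol ∉ visited)
    (h2 : grammar.any (fun rule => rule.1 == symbol) = true) :
    pvMeasure grammar (visited ++ [symbol]) < pvMeasure grammar visited := by
  apply Finset.card_lt_card
  constructor
  · intro x hx
    simp only [Finset.mem_sdiff, List.mem_toFinset, List.mem_append, List.mem_singleton] at hx ⊢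
    exact ⟨hx.1, fun hv => hx.2 (Or.inl hv)⟩
  · intro hsub
    simp only [List.any_eq_true, beq_iff_eq] at h2
    obtain ⟨rule, hrule, hfst⟩ := h2
    have hmem : symbol ∈ (grammar.map Prod.fst).toFinset \ visited.toFinset := by
      simp only [Finset.mem_sdiff, List.mem_toFinset, List.mem_map]
      exact ⟨⟨rule, hrule, hfst⟩, h1⟩
    have h3 := hsub hmem
    simp at h3

-- ===== PORT A =====
mutual
-- literal transliteration of A: membership test, `any`-based terminal test, then a loop over
-- the matching right-hand sides; each candidate RHS is checked with `all` (recomputing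
-- cfgempty) and, when it passes, the result is rebuilt by a second pass of recursive calls.
def cfgempty (grammar : List (String × List String)) (symbol : String) (visited : List String) : Option (List String) :=
  if _h1 : symbol ∈ visited then none
  else if _h2 : ¬ (grammar.any (fun rule => rule.1 == symbol) = true) then some [symbol]
  else
    pvLoopA grammar ((grammar.filter (fun r => r.1 == symbol)).map (fun r => r.2)) (visited ++ [symbol])
termination_by (pvMeasure grammar visited, 0, 0)
decreasing_by
  exact Prod.Lex.left _ _ (pvMeasure_lt grammar symbol visited _h1 (by simpa using _h2))

-- the `for rhs in …` loop of A with its early `return`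
def pvLoopA (grammar : List (String × List String)) (rhss : List (List String)) (visited : List String) : Option (List String) :=
  match rhss with
  | [] => none
  | rhs :: rest =>
    if rhs.all (fun r => cfgempty grammar r visited != none) then
      -- guarded by the all-check, Python's `result + cfgempty(...)` never sees None; `.getD []` totalizes exactly there
      some (rhs.foldl (fun result r => result ++ (cfgempty grammar r visited).getD []) [])
    else pvLoopA grammar rest visited
termination_by (pvMeasure grammar visited, 1, rhss.length)
decreasing_by
  · exact Prod.Lex.right _ (Prod.Lex.left _ _ (by omega))
  · exact Prod.Lex.right _ (Prod.Lex.left _ _ (by omega))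
  · exact Prod.Lex.right _ (Prod.Lex.right _ (by simp))
end

-- ===== PORT B =====
mutual
-- port of Source B: one grammar scan builds rhss (emptiness doubles as the terminal test);
-- each RHS is expanded by _derive in a single pass that aborts on the first None.
def cfgempty_alt (grammar : List (String × List String)) (symbol : String) (visited : List String) : Option (List String) :=
  if _h1 : symbol ∈ visited then none
  else
    if _h2 : ((grammar.filter (fun r => r.1 == symbol)).map (fun r => r.2)) = [] then some [symbol]
    else
      pvFirstB grammar ((grammar.filter (fun r => r.1 == symbol)).map (fun r => r.2)) (visited ++ [symbol])
termination_by (pvMeasure grammar visited, 0, 0)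
decreasing_by
  refine Prod.Lex.left _ _ (pvMeasure_lt grammar symbol visited _h1 ?_)
  have hf : (grammar.filter (fun r => r.1 == symbol)) ≠ [] := fun he => _h2 (by simp [he])
  rcases List.exists_mem_of_ne_nil _ hf with ⟨r, hr⟩
  rcases List.mem_filter.mp hr with ⟨hm, hp⟩
  exact List.any_eq_true.mpr ⟨r, hm, hp⟩

-- the `for rhs in rhss` loop of Source B with its early `return`
def pvFirstB (grammar : List (String × List String)) (rhss : List (List String)) (visited : List String) : Option (List String) :=
  match rhss with
  | [] => none
  | rhs :: rest =>
    match pvDeriveB grammar rhs visited [] with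
    | some parts => some parts
    | none => pvFirstB grammar rest visited
termination_by (pvMeasure grammar visited, 2, rhss.length)
decreasing_by
  · exact Prod.Lex.right _ (Prod.Lex.left _ _ (by omega))
  · exact Prod.Lex.right _ (Prod.Lex.right _ (by simp))

-- _derive of Source B: single pass, accumulator `parts`, early return None
def pvDeriveB (grammar : List (String × List String)) (rhs : List String) (visited : List String) (parts : List String) : Option (List String) :=
  match rhs with
  | [] => some parts
  | r :: rest =>
    match cfgempty_alt grammar r visited with
    | none => none
    | some sub => pvDeriveB grammar rest visited (parts ++ sub)
termination_by (pvMeasure grammar visited, 1, rhs.length)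
decreasing_by
  · exact Prod.Lex.right _ (Prod.Lex.left _ _ (by omega))
  · exact Prod.Lex.right _ (Prod.Lex.right _ (by simp))
end

-- ===== PRECONDITION & SPEC =====
def Spec_cfgempty (grammar : List (String × List String)) (symbol : String) (visited : List String) (out : Option (List String)) : Prop := out = cfgempty_alt grammar symbol visited
instance (grammar : List (String × List String)) (symbol : String) (visited : List String) (out : Option (List String)) : Decidable (Spec_cfgempty grammar symbol visited out) := by unfold Spec_cfgempty; infer_instance

-- ===== CLAIM (what is proved, stated in full; the proofs are below) =====
def Claim_equal_cfgempty : Prop := ∀ (grammar : List (String × List String)) (symbol : String) (visited : List String), Dom_cfgempty grammar symbol visited → Spec_cfgempty grammar symbol visited (cfgempty grammar symbol visited)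

-- ===== LEMMAS AND PROOFS =====

theorem pvDeriveB_eq (grammar : List (String × List String)) (visited : List String)
    (h : ∀ r, cfgempty_alt grammar r visited = cfgempty grammar r visited) :
    ∀ (rhs : List String) (parts : List String),
      pvDeriveB grammar rhs visited parts =
        if rhs.all (fun r => cfgempty grammar r visited != none) then
          some (rhs.foldl (fun result r => result ++ (cfgempty grammar r visited).getD []) parts)
        else none := by
  intro rhs
  induction rhs with
  | nil => intro parts; simp [pvDeriveB]
  | cons r rest ih =>
    intro parts
    rw [pvDeriveB, h r]
    cases hr : cfgempty grammar r visited with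
    | none => simp [hr]
    | some sub => simp [hr, ih]

theorem pvFirstB_eq (grammar : List (String × List String)) (visited : List String)
    (h : ∀ r, cfgempty_alt grammar r visited = cfgempty grammar r visited) :
    ∀ rhss : List (List String),
      pvFirstB grammar rhss visited = pvLoopA grammar rhss visited := by
  intro rhss
  induction rhss with
  | nil => simp [pvFirstB, pvLoopA]
  | cons rhs rest ih =>
    rw [pvFirstB, pvLoopA, pvDeriveB_eq grammar visited h rhs []]
    split_ifs with hall
    · rfl
    · simpa using ih

theorem terminal_iff (grammar : List (String × List String)) (symbol : String) :
    ((grammar.filter (fun r => r.1 == symbol)).map (fun r => r.2)) = [] ↔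
      ¬ (grammar.any (fun rule => rule.1 == symbol) = true) := by
  constructor
  · intro h hany
    rcases List.any_eq_true.mp hany with ⟨rule, hm, hp⟩
    exact List.filter_eq_nil_iff.mp (List.map_eq_nil_iff.mp h) rule hm hp
  · intro h
    rw [List.map_eq_nil_iff, List.filter_eq_nil_iff]
    intro rule hm hp
    exact h (List.any_eq_true.mpr ⟨rule, hm, hp⟩)

theorem cfgempty_eq_alt (grammar : List (String × List String)) :
    ∀ (n : Nat) (symbol : String) (visited : List String), pvMeasure grammar visited < n →
      cfgempty_alt grammar symbol visited = cfgempty grammar symbol visited := by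
  intro n
  induction n with
  | zero => intro _ _ h; omega
  | succ n ih =>
    intro symbol visited hlt
    by_cases h1 : symbol ∈ visited
    · rw [cfgempty, cfgempty_alt, dif_pos h1, dif_pos h1]
    · by_cases h2 : ((grammar.filter (fun r => r.1 == symbol)).map (fun r => r.2)) = []
      · rw [cfgempty, cfgempty_alt, dif_neg h1, dif_neg h1, dif_pos h2,
          dif_pos ((terminal_iff grammar symbol).mp h2)]
      · have hany : grammar.any (fun rule => rule.1 == symbol) = true := by
          by_contra hn
          exact h2 ((terminal_iff grammar symbol).mpr hn)
        have hdec : pvMeasure grammar (visited ++ [symbol]) < n := by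
          have := pvMeasure_lt grammar symbol visited h1 hany
          omega
        rw [cfgempty, cfgempty_alt, dif_neg h1, dif_neg h1, dif_neg h2,
          dif_neg (not_not_intro hany)]
        exact pvFirstB_eq grammar (visited ++ [symbol]) (fun r => ih r _ hdec) _

-- ===== VERDICT (by name: the statement is the Claim_ definition above) =====
theorem cfgempty_spec : Claim_equal_cfgempty := by
  intro grammar symbol visited _
  exact (cfgempty_eq_alt grammar (pvMeasure grammar visited + 1) symbol visited (by omega)).symm
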